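-- pv_equiv track=rewrite | github.com/Agustinjoel/aftr-mvp | app/ui_team.py | _team_logo_slug
-- ===== SOURCE A (Python) =====
-- import unicodedata
--
-- def _team_logo_slug(name: str) -> str:
--     """
--     Normaliza el nombre de un equipo a un slug para la ruta estática de logo.
--     Ej. 'Eintracht Frankfurt' → 'eintracht-frankfurt'.
--     """
--     if not name or not isinstance(name, str):
--         return ""
--     # Quita acentos: NFD descompone, luego se descartan los combining chars
--     s = unicodedata.normalize("NFD", name)
--     s = "".join(c for c in s if unicodedata.category(c) != "Mn")
--     s = "".join(c for c in s if c.isalnum() or c in " -")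
--     s = s.strip().replace(" ", "-").lower()
--     while "--" in s:
--         s = s.replace("--", "-")
--     return s.strip("-")
-- ===== SOURCE B (Python) =====
-- import unicodedata
--
-- def _team_logo_slug(name: str) -> str:
--     """One pass: skip combining marks and junk, collapse space/dash runs into a
--     single '-', never emit a leading or trailing '-'."""
--     if not name or not isinstance(name, str):
--         return ""
--     out = []
--     pending = False
--     for c in unicodedata.normalize("NFD", name):
--         if unicodedata.category(c) == "Mn":
--             continue
--         if c == " " or c == "-":
--             if out:
--                 pending = True
--         elif c.isalnum():
--             if pending:
--                 out.append("-")
--                 pending = False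
--             out.append(c.lower())
--     return "".join(out)
-- ===== Notes on version B (the rewrite author's own statement) =====
-- stated objective: simpler
-- what changed: A's six-pass pipeline (two join/filter passes, strip, space-to-dash replace, lower, a repeated double-dash-collapsing replace loop, then stripping boundary dashes) is replaced by a single left-to-right pass with a pending-separator flag that emits lowercased alphanumerics with at most one dash between words and none at the ends.
import Mathlib
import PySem

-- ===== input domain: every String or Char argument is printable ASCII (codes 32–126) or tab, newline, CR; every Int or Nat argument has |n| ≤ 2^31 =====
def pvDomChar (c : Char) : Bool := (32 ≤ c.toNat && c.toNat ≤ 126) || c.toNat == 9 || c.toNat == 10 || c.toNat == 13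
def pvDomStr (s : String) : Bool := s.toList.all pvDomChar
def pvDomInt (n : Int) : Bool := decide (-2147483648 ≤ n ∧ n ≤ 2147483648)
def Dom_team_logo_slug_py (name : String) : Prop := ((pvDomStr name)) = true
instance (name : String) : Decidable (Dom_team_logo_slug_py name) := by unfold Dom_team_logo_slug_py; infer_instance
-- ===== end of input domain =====

-- B replaces A's six-pass pipeline (two filters, strip, replace, lower, a whack-a-mole
-- 'while "--" in s' loop, strip('-')) by a single pass with a pending-separator flag.
-- NB: unicodedata.normalize("NFD", ·) and the category-'Mn' filter are the identity on the
-- printable-ASCII input domain (no combining marks in ASCII), so both ports transcribe these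
-- two steps as the identity; everything else is ported step for step.

-- ===== PORT A =====
-- pvRep1 / pvHasDD and the lemmas up to pv_collapse_dec exist only to justify termination of
-- pvCollapse, the port of A's 'while "--" in s: s = s.replace("--", "-")' loop (each pass
-- strictly shrinks the string); pvCollapse cites pv_collapse_dec in its decreasing_by.
def pvRep1 : List Char → List Char
  | [] => []
  | [c] => [c]
  | a :: b :: t => if a = '-' ∧ b = '-' then '-' :: pvRep1 t else a :: pvRep1 (b :: t)

def pvHasDD : List Char → Bool
  | [] => false
  | [_] => false
  | a :: b :: t => (decide (a = '-' ∧ b = '-')) || pvHasDD (b :: t)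

lemma pv_go_dd : ∀ (fuel : Nat) (l acc : List Char), l.length ≤ fuel →
    PySem.Chars.replace.go ['-','-'] ['-'] fuel l acc = acc.reverse ++ pvRep1 l := by
  intro fuel
  induction fuel with
  | zero =>
    intro l acc h
    have : l = [] := by cases l <;> simp_all
    subst this
    simp [PySem.Chars.replace.go, pvRep1]
  | succ n ih =>
    intro l acc h
    match l with
    | [] => simp [PySem.Chars.replace.go, pvRep1]
    | [c] =>
      have hp : List.isPrefixOf ['-','-'] [c] = false := by simp [List.isPrefixOf]
      simp only [PySem.Chars.replace.go, hp, Bool.false_eq_true, if_false]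
      rw [ih [] (c :: acc) (by simp)]
      simp [pvRep1]
    | a :: b :: t =>
      by_cases hd : a = '-' ∧ b = '-'
      · obtain ⟨ha, hb⟩ := hd
        subst ha; subst hb
        have hp : List.isPrefixOf ['-','-'] ('-' :: '-' :: t) = true := by simp [List.isPrefixOf]
        simp only [PySem.Chars.replace.go, hp, if_true, List.length_cons, List.drop_succ_cons,
          List.drop_zero, List.length_nil, List.reverse_cons, List.reverse_nil, List.nil_append,
          List.singleton_append, List.drop]
        rw [ih t ('-' :: acc) (by simp at h ⊢; omega)]
        simp [pvRep1]
      · have hp : List.isPrefixOf ['-','-'] (a :: b :: t) = false := by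
          simp only [List.isPrefixOf, Bool.and_eq_false_iff, List.isPrefixOf_nil_left]
          by_cases h1 : a = '-'
          · right; left; subst h1
            have h2 : ¬ b = '-' := fun hb => hd ⟨rfl, hb⟩
            simp [beq_eq_false_iff_ne]
            exact fun hb => h2 hb.symm
          · left; simp [beq_eq_false_iff_ne]
            exact fun hb => h1 hb.symm
        simp only [PySem.Chars.replace.go, hp, Bool.false_eq_true, if_false]
        rw [ih (b :: t) (a :: acc) (by simp at h ⊢; omega)]
        simp [pvRep1, hd]

lemma pv_replace_dd (l : List Char) :
    PySem.Chars.replace l ['-','-'] ['-'] = pvRep1 l := by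
  rw [PySem.Chars.replace]
  simp only [List.isEmpty_cons, Bool.false_eq_true, if_false]
  exact pv_go_dd l.length l [] le_rfl

lemma pv_isIn_dd (l : List Char) : PySem.Chars.isIn ['-','-'] l = pvHasDD l := by
  suffices h : ∀ (l : List Char) (k : Nat), (PySem.Chars.find.go ['-','-'] l k != -1) = pvHasDD l by
    exact h l 0
  intro l
  induction l with
  | nil => intro k; simp [PySem.Chars.find.go, pvHasDD]
  | cons c t ih =>
    intro k
    match t with
    | [] =>
      have hp : List.isPrefixOf ['-','-'] [c] = false := by simp [List.isPrefixOf]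
      simp [PySem.Chars.find.go, hp, pvHasDD]
    | b :: u =>
      by_cases hd : c = '-' ∧ b = '-'
      · obtain ⟨h1,h2⟩ := hd; subst h1; subst h2
        have hp : List.isPrefixOf ['-','-'] ('-' :: '-' :: u) = true := by simp [List.isPrefixOf]
        rw [PySem.Chars.find.go]
        simp [hp, pvHasDD]
      · have hp : List.isPrefixOf ['-','-'] (c :: b :: u) = false := by
          simp only [List.isPrefixOf, Bool.and_eq_false_iff, List.isPrefixOf_nil_left]
          by_cases h1 : c = '-'
          · right; left; subst h1
            have h2 : ¬ b = '-' := fun hb => hd ⟨rfl, hb⟩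
            simp [beq_eq_false_iff_ne]
            exact fun hb => h2 hb.symm
          · left; simp [beq_eq_false_iff_ne]
            exact fun hb => h1 hb.symm
        rw [PySem.Chars.find.go]
        simp only [hp, Bool.false_eq_true, if_false]
        rw [ih (k+1)]
        simp [pvHasDD, hd]

lemma pv_rep1_len_le (l : List Char) : (pvRep1 l).length ≤ l.length := by
  fun_induction pvRep1 l <;> simp_all <;> omega

lemma pv_rep1_len_lt (l : List Char) (h : pvHasDD l = true) : (pvRep1 l).length < l.length := by
  fun_induction pvRep1 l with
  | case1 => simp [pvHasDD] at h
  | case2 => simp [pvHasDD] at h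
  | case3 a b t hd ih =>
    have := pv_rep1_len_le t
    simp; omega
  | case4 a b t hd ih =>
    simp only [pvHasDD, Bool.or_eq_true, decide_eq_true_eq] at h
    rcases h with h | h
    · exact absurd h hd
    · have := ih h
      simp at this ⊢; omega

lemma pv_collapse_dec (l : List Char) (h : PySem.Chars.isIn ['-','-'] l = true) :
    (PySem.Chars.replace l ['-','-'] ['-']).length < l.length := by
  rw [pv_replace_dd]
  exact pv_rep1_len_lt l (by rwa [pv_isIn_dd] at h)

def pvCollapse (s : List Char) : List Char :=
  if h : PySem.Chars.isIn ['-','-'] s = true then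
    pvCollapse (PySem.Chars.replace s ['-','-'] ['-'])
  else s
termination_by s.length
decreasing_by exact pv_collapse_dec s h

def team_logo_slug_py (name : String) : String :=
  if name.toList.isEmpty then "" else
  let s1 : List Char := name.toList
  let s2 : List Char := s1.filter (fun c => PySem.Chars.isalnum c || PySem.Chars.isIn [c] [' ', '-'])
  let s3 : List Char := PySem.Chars.lower (PySem.Chars.replace (PySem.Chars.strip s2) [' '] ['-'])
  let s4 : List Char := pvCollapse s3
  String.ofList (PySem.Chars.stripChars s4 ['-'])

-- ===== PORT B =====
def pvStep (st : List Char × Bool) (c : Char) : List Char × Bool :=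
  if c = ' ' ∨ c = '-' then (st.1, if st.1.isEmpty then st.2 else true)
  else if PySem.Chars.isalnum c then
    ((if st.2 then st.1 ++ ['-'] else st.1) ++ [PySem.Chars.lowerChar c], false)
  else st

def team_logo_slug_py_alt (name : String) : String :=
  if name.toList.isEmpty then "" else
  String.ofList (name.toList.foldl pvStep ([], false)).1

-- ===== PRECONDITION & SPEC =====
def Spec_team_logo_slug_py (name : String) (out : String) : Prop := out = team_logo_slug_py_alt name
instance (name : String) (out : String) : Decidable (Spec_team_logo_slug_py name out) := by unfold Spec_team_logo_slug_py; infer_instance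

-- ===== CLAIM (what is proved, stated in full; the proofs are below) =====
def Claim_equal_team_logo_slug_py : Prop := ∀ (name : String), Dom_team_logo_slug_py name → Spec_team_logo_slug_py name (team_logo_slug_py name)

-- ===== LEMMAS AND PROOFS =====
def pvDed : List Char → List Char
  | [] => []
  | [c] => [c]
  | a :: b :: t => if a = '-' ∧ b = '-' then pvDed (b :: t) else a :: pvDed (b :: t)

lemma pv_ded_noDD (l : List Char) (h : pvHasDD l = false) : pvDed l = l := by
  fun_induction pvDed l with
  | case1 => rfl
  | case2 => rfl
  | case3 a b t hd => simp [pvHasDD, hd] at h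
  | case4 a b t hd ih =>
    simp only [pvHasDD, Bool.or_eq_false_iff, decide_eq_false_iff_not] at h
    rw [ih h.2]

lemma pv_ded_rep1 : ∀ (n : Nat) (l : List Char), l.length ≤ n →
    pvDed (pvRep1 l) = pvDed l ∧ pvDed ('-' :: pvRep1 l) = pvDed ('-' :: l) := by
  intro n
  induction n with
  | zero =>
    intro l h
    have : l = [] := by cases l <;> simp_all
    subst this; exact ⟨rfl, rfl⟩
  | succ n ih =>
    intro l h
    match l with
    | [] => exact ⟨rfl, rfl⟩
    | [c] => exact ⟨rfl, rfl⟩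
    | a :: b :: t =>
      simp only [List.length_cons] at h
      by_cases hd : a = '-' ∧ b = '-'
      · obtain ⟨ha, hb⟩ := hd; subst ha; subst hb
        have hq := (ih t (by omega)).2
        have hr : pvRep1 ('-' :: '-' :: t) = '-' :: pvRep1 t := by simp [pvRep1]
        constructor
        · rw [hr, hq]
          simp [pvDed]
        · rw [hr]
          rw [show pvDed ('-' :: '-' :: pvRep1 t) = pvDed ('-' :: pvRep1 t) by simp [pvDed]]
          rw [hq]
          simp [pvDed]
      · have hp := (ih (b :: t) (by simp; omega)).1
        have hq := (ih (b :: t) (by simp; omega)).2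
        by_cases ha : a = '-'
        · subst ha
          have hb : ¬ b = '-' := fun hb => hd ⟨rfl, hb⟩
          have hr : pvRep1 ('-' :: b :: t) = '-' :: pvRep1 (b :: t) := by simp [pvRep1, hb]
          constructor
          · rw [hr]; exact hq
          · rw [hr]
            rw [show pvDed ('-' :: '-' :: pvRep1 (b :: t)) = pvDed ('-' :: pvRep1 (b :: t)) by
              simp [pvDed]]
            rw [hq]
            simp [pvDed]
        · have hcons : ∀ (x : List Char), pvDed (a :: x) = a :: pvDed x := by
            intro x; cases x with
            | nil => rfl
            | cons y ys => simp [pvDed, ha]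
          constructor
          · simp only [pvRep1, if_neg hd]
            rw [hcons, hcons, hp]
          · simp only [pvRep1, if_neg hd]
            have hnd : ∀ (x : List Char), pvDed ('-' :: a :: x) = '-' :: pvDed (a :: x) := by
              intro x; simp [pvDed, ha]
            rw [hnd, hnd, hcons, hcons, hp]

lemma pv_collapse_eq_ded (l : List Char) : pvCollapse l = pvDed l := by
  fun_induction pvCollapse l with
  | case1 s h ih =>
    rw [ih, pv_replace_dd]
    exact (pv_ded_rep1 s.length s le_rfl).1
  | case2 s h =>
    rw [pv_ded_noDD]
    rw [← pv_isIn_dd]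
    simpa using h

def pvIsDash (c : Char) : Bool := c == '-'

def pvLstripD (l : List Char) : List Char := l.dropWhile pvIsDash

def pvRstripD (l : List Char) : List Char := (l.reverse.dropWhile pvIsDash).reverse

def pvDSlugN : Bool → List Char → List Char
  | _, [] => []
  | p, c :: t => if c = '-' then pvDSlugN true t else (if p then ['-'] else []) ++ c :: pvDSlugN false t

def pvDSlugE : List Char → List Char
  | [] => []
  | c :: t => if c = '-' then pvDSlugE t else c :: pvDSlugN false t

lemma pv_stripChars_dash (l : List Char) :
    PySem.Chars.stripChars l ['-'] = pvRstripD (pvLstripD l) := by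
  have hpred : (fun c => List.contains ['-'] c) = pvIsDash := by
    funext c
    by_cases h : c = '-' <;> simp [pvIsDash, h]
  simp only [PySem.Chars.stripChars, pvRstripD, pvLstripD]
  rw [hpred]

lemma pv_ded_cons (a : Char) (ha : ¬ a = '-') (x : List Char) :
    pvDed (a :: x) = a :: pvDed x := by
  cases x with
  | nil => rfl
  | cons y ys => simp [pvDed, ha]

lemma pv_rstripD_cons (c : Char) (hc : ¬ c = '-') (y : List Char) :
    pvRstripD (c :: y) = c :: pvRstripD y := by
  have hc' : pvIsDash c = false := by simp [pvIsDash, hc]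
  simp only [pvRstripD, List.reverse_cons, List.dropWhile_append]
  by_cases h : (y.reverse.dropWhile pvIsDash).isEmpty
  · simp [h, List.dropWhile_cons, hc', List.isEmpty_iff.mp h]
  · simp [h]

lemma pv_rstripD_dash_nil : pvRstripD ['-'] = [] := by decide

lemma pv_rstripD_cons₂ (a c : Char) (hc : ¬ c = '-') (y : List Char) :
    pvRstripD (a :: c :: y) = a :: pvRstripD (c :: y) := by
  have hc' : pvIsDash c = false := by simp [pvIsDash, hc]
  have hne : ((c :: y).reverse.dropWhile pvIsDash) ≠ [] := by
    simp only [List.reverse_cons, List.dropWhile_append]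
    by_cases h : (y.reverse.dropWhile pvIsDash).isEmpty <;> simp [h, List.dropWhile_cons, hc']
  simp only [pvRstripD, List.reverse_cons, List.dropWhile_append] at *
  rw [if_neg (by simpa [List.isEmpty_iff] using hne)]
  simp

lemma pv_N : ∀ (n : Nat) (t : List Char), t.length ≤ n →
    pvRstripD (pvDed t) = pvDSlugN false t ∧ pvRstripD (pvDed ('-' :: t)) = pvDSlugN true t := by
  intro n
  induction n with
  | zero =>
    intro t h
    have : t = [] := by cases t <;> simp_all
    subst this
    exact ⟨by simp [pvDed, pvRstripD, pvDSlugN], by simpa [pvDed, pvDSlugN] using pv_rstripD_dash_nil⟩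
  | succ n ih =>
    intro t h
    match t with
    | [] =>
      exact ⟨by simp [pvDed, pvRstripD, pvDSlugN], by simpa [pvDed, pvDSlugN] using pv_rstripD_dash_nil⟩
    | '-' :: u =>
      have hu := ih u (by simp at h; omega)
      constructor
      · rw [show pvDSlugN false ('-' :: u) = pvDSlugN true u by simp [pvDSlugN]]
        exact hu.2
      · rw [show pvDed ('-' :: '-' :: u) = pvDed ('-' :: u) by simp [pvDed]]
        rw [show pvDSlugN true ('-' :: u) = pvDSlugN true u by simp [pvDSlugN]]
        exact hu.2
    | c :: u =>
      by_cases hc : c = '-'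
      · subst hc
        have hu := ih u (by simp at h; omega)
        constructor
        · rw [show pvDSlugN false ('-' :: u) = pvDSlugN true u by simp [pvDSlugN]]
          exact hu.2
        · rw [show pvDed ('-' :: '-' :: u) = pvDed ('-' :: u) by simp [pvDed]]
          rw [show pvDSlugN true ('-' :: u) = pvDSlugN true u by simp [pvDSlugN]]
          exact hu.2
      · have hu := ih u (by simp at h; omega)
        have hded : pvDed (c :: u) = c :: pvDed u := pv_ded_cons c hc u
        constructor
        · rw [hded, pv_rstripD_cons c hc, hu.1]
          simp [pvDSlugN, hc]
        · rw [show pvDed ('-' :: c :: u) = '-' :: pvDed (c :: u) by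
            simp [pvDed, hc]]
          rw [hded, pv_rstripD_cons₂ '-' c hc, pv_rstripD_cons c hc, hu.1]
          simp [pvDSlugN, hc]

lemma pv_E (l : List Char) : pvRstripD (pvLstripD (pvDed l)) = pvDSlugE l := by
  induction l with
  | nil => simp [pvDed, pvLstripD, pvRstripD, pvDSlugE]
  | cons c t ih =>
    by_cases hc : c = '-'
    · subst hc
      match t with
      | [] => simpa [pvDed, pvDSlugE, pvDSlugN, pvLstripD, pvIsDash] using pv_rstripD_dash_nil
      | '-' :: u =>
        rw [show pvDed ('-' :: '-' :: u) = pvDed ('-' :: u) by simp [pvDed]]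
        rw [show pvDSlugE ('-' :: '-' :: u) = pvDSlugE ('-' :: u) by simp [pvDSlugE]]
        exact ih
      | b :: u =>
        by_cases hb : b = '-'
        · subst hb
          rw [show pvDed ('-' :: '-' :: u) = pvDed ('-' :: u) by simp [pvDed]]
          rw [show pvDSlugE ('-' :: '-' :: u) = pvDSlugE ('-' :: u) by simp [pvDSlugE]]
          exact ih
        · rw [show pvDed ('-' :: b :: u) = '-' :: pvDed (b :: u) by simp [pvDed, hb]]
          rw [show pvLstripD ('-' :: pvDed (b :: u)) = pvLstripD (pvDed (b :: u)) by
            simp [pvLstripD, List.dropWhile_cons, pvIsDash]]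
          rw [pv_ded_cons b hb u]
          rw [show pvLstripD (b :: pvDed u) = b :: pvDed u by
            simp [pvLstripD, List.dropWhile_cons, pvIsDash, hb]]
          rw [pv_rstripD_cons b hb, (pv_N u.length u le_rfl).1]
          simp [pvDSlugE, pvDSlugN, hb]
    · rw [pv_ded_cons c hc t]
      rw [show pvLstripD (c :: pvDed t) = c :: pvDed t by
        simp [pvLstripD, List.dropWhile_cons, pvIsDash, hc]]
      rw [pv_rstripD_cons c hc, (pv_N t.length t le_rfl).1]
      simp [pvDSlugE, hc]

lemma pv_alnum_bounds (c : Char) (h : PySem.Chars.isalnum c = true) :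
    (48 ≤ c.toNat ∧ c.toNat ≤ 57) ∨ (65 ≤ c.toNat ∧ c.toNat ≤ 90) ∨ (97 ≤ c.toNat ∧ c.toNat ≤ 122) := by
  simp only [PySem.Chars.isalnum, PySem.Chars.isalpha, PySem.Chars.isupper, PySem.Chars.islower,
    PySem.Chars.isdigit, Bool.or_eq_true, Bool.and_eq_true, decide_eq_true_eq, Char.le_def,
    UInt32.le_iff_toNat_le, Char.toNat_val,
    show 'A'.val.toNat = 65 from rfl, show 'Z'.val.toNat = 90 from rfl,
    show 'a'.val.toNat = 97 from rfl, show 'z'.val.toNat = 122 from rfl,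
    show '0'.val.toNat = 48 from rfl, show '9'.val.toNat = 57 from rfl] at h
  have hv : c.toNat = c.val.toNat := rfl
  omega

lemma pv_alnum_not_space (c : Char) (h : PySem.Chars.isalnum c = true) :
    PySem.Chars.isspace c = false := by
  have hb := pv_alnum_bounds c h
  simp only [PySem.Chars.isspace, Bool.or_eq_false_iff, Bool.and_eq_false_iff,
    decide_eq_false_iff_not]
  omega



lemma pv_lower_ne_dash (c : Char) (h : PySem.Chars.isalnum c = true) :
    ¬ PySem.Chars.lowerChar c = '-' := by
  have hb := pv_alnum_bounds c h
  by_cases hu : PySem.Chars.isupper c = true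
  · have hb2 : 65 ≤ c.toNat ∧ c.toNat ≤ 90 := by
      simp only [PySem.Chars.isupper, Bool.and_eq_true, decide_eq_true_eq, Char.le_def,
        UInt32.le_iff_toNat_le, Char.toNat_val, show 'A'.val.toNat = 65 from rfl,
        show 'Z'.val.toNat = 90 from rfl] at hu
      have hv : c.toNat = c.val.toNat := rfl
      omega
    simp only [PySem.Chars.lowerChar, hu, if_true]
    intro he
    have htn : (Char.ofNat (c.toNat + 32)).toNat = c.toNat + 32 := by
      rw [Char.toNat_ofNat]
      have : (c.toNat + 32).isValidChar := Or.inl (by omega)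
      simp [this]
    have h45 := congrArg Char.toNat he
    rw [htn] at h45
    simp only [show ('-' : Char).toNat = 45 from rfl] at h45
    omega
  · simp only [PySem.Chars.lowerChar, hu, Bool.false_eq_true, if_false]
    intro he
    have h45 := congrArg Char.toNat he
    simp only [show ('-' : Char).toNat = 45 from rfl] at h45
    omega

def pvKeep (c : Char) : Bool := PySem.Chars.isalnum c || (decide (c = ' ') || decide (c = '-'))

lemma pv_isIn_single (c : Char) :
    PySem.Chars.isIn [c] [' ', '-'] = (decide (c = ' ') || decide (c = '-')) := by
  by_cases h1 : c = ' '
  · subst h1; decide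
  · by_cases h2 : c = '-'
    · subst h2; decide
    · have e1 : (c == ' ') = false := by simp [h1]
      have e2 : (c == '-') = false := by simp [h2]
      simp [PySem.Chars.isIn, PySem.Chars.find, PySem.Chars.find.go, List.isPrefixOf, e1, e2, h1, h2]

def pvConv (c : Char) : Char := PySem.Chars.lowerChar (if c = ' ' then '-' else c)

lemma pv_go_sp : ∀ (fuel : Nat) (l acc : List Char), l.length ≤ fuel →
    PySem.Chars.replace.go [' '] ['-'] fuel l acc
      = acc.reverse ++ l.map (fun c => if c = ' ' then '-' else c) := by
  intro fuel
  induction fuel with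
  | zero =>
    intro l acc h
    have : l = [] := by cases l <;> simp_all
    subst this
    simp [PySem.Chars.replace.go]
  | succ n ih =>
    intro l acc h
    match l with
    | [] => simp [PySem.Chars.replace.go]
    | c :: t =>
      by_cases hc : c = ' '
      · subst hc
        have hp : List.isPrefixOf [' '] (' ' :: t) = true := by simp [List.isPrefixOf]
        simp only [PySem.Chars.replace.go, hp, if_true, List.length_cons, List.drop_succ_cons,
          List.drop_zero, List.reverse_cons, List.reverse_nil, List.nil_append,
          List.singleton_append, List.length_singleton, List.length_nil, List.drop_one, List.tail_cons]
        rw [ih t ('-' :: acc) (by simp at h; omega)]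
        simp
      · have hp : List.isPrefixOf [' '] (c :: t) = false := by
          simp [List.isPrefixOf, beq_eq_false_iff_ne]
          exact fun he => hc he.symm
        simp only [PySem.Chars.replace.go, hp, Bool.false_eq_true, if_false]
        rw [ih t (c :: acc) (by simp at h; omega)]
        simp [hc]

lemma pv_replace_sp (l : List Char) :
    PySem.Chars.replace l [' '] ['-'] = l.map (fun c => if c = ' ' then '-' else c) := by
  rw [PySem.Chars.replace]
  simp only [List.isEmpty_cons, Bool.false_eq_true, if_false]
  exact pv_go_sp l.length l [] le_rfl

def pvSlugN : Bool → List Char → List Char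
  | _, [] => []
  | p, c :: t =>
    if c = ' ' ∨ c = '-' then pvSlugN true t
    else if PySem.Chars.isalnum c then
      (if p then ['-'] else []) ++ PySem.Chars.lowerChar c :: pvSlugN false t
    else pvSlugN p t

def pvSlugE : List Char → List Char
  | [] => []
  | c :: t =>
    if c = ' ' ∨ c = '-' then pvSlugE t
    else if PySem.Chars.isalnum c then PySem.Chars.lowerChar c :: pvSlugN false t
    else pvSlugE t

lemma pv_dslug_map (g : List Char) (hk : ∀ c ∈ g, pvKeep c = true) :
    (∀ p, pvDSlugN p (g.map pvConv) = pvSlugN p g) ∧ pvDSlugE (g.map pvConv) = pvSlugE g := by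
  induction g with
  | nil => exact ⟨fun p => rfl, rfl⟩
  | cons c t ih =>
    have hkt : ∀ x ∈ t, pvKeep x = true := fun x hx => hk x (List.mem_cons_of_mem c hx)
    obtain ⟨ihN, ihE⟩ := ih hkt
    by_cases hs : c = ' ' ∨ c = '-'
    · have hc : pvConv c = '-' := by
        rcases hs with h | h <;> subst h <;> decide
      constructor
      · intro p
        simp only [List.map_cons, hc, pvDSlugN, if_pos rfl, pvSlugN, if_pos hs]
        exact ihN true
      · simp only [List.map_cons, hc, pvDSlugE, if_pos rfl, pvSlugE, if_pos hs]
        exact ihE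
    · have ha : PySem.Chars.isalnum c = true := by
        have := hk c (List.mem_cons_self)
        simp only [pvKeep, Bool.or_eq_true, decide_eq_true_eq] at this
        tauto
      have hc : pvConv c = PySem.Chars.lowerChar c := by
        simp only [pvConv, if_neg (fun h => hs (Or.inl h))]
      have hnd : ¬ PySem.Chars.lowerChar c = '-' := pv_lower_ne_dash c ha
      constructor
      · intro p
        simp only [List.map_cons, pvDSlugN, hc, if_neg hnd, pvSlugN, if_neg hs, ha, if_true,
          ihN false]
      · simp only [List.map_cons, pvDSlugE, hc, if_neg hnd, pvSlugE, if_neg hs, ha, if_true,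
          ihN false]

lemma pv_keep_space (c : Char) (hk : pvKeep c = true) (hs : PySem.Chars.isspace c = true) :
    c = ' ' := by
  simp only [pvKeep, Bool.or_eq_true, decide_eq_true_eq] at hk
  rcases hk with h | h | h
  · rw [pv_alnum_not_space c h] at hs; exact absurd hs (by simp)
  · exact h
  · subst h; exact absurd hs (by decide)

lemma pv_slug_append_space (g : List Char) :
    pvSlugE (g ++ [' ']) = pvSlugE g ∧ ∀ p, pvSlugN p (g ++ [' ']) = pvSlugN p g := by
  induction g with
  | nil => exact ⟨by simp [pvSlugE, pvSlugN], fun p => by simp [pvSlugN]⟩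
  | cons c t ih =>
    constructor
    · simp only [List.cons_append, pvSlugE]
      split_ifs <;> simp [ih.1, ih.2 true, ih.2 false]
    · intro p
      simp only [List.cons_append, pvSlugN]
      split_ifs <;> simp [ih.2 true, ih.2 false, ih.2 p]

lemma pv_slugE_lstrip (f : List Char) (hk : ∀ c ∈ f, pvKeep c = true) :
    pvSlugE (f.dropWhile PySem.Chars.isspace) = pvSlugE f := by
  induction f with
  | nil => rfl
  | cons c t ih =>
    by_cases hs : PySem.Chars.isspace c = true
    · have hc := pv_keep_space c (hk c List.mem_cons_self) hs
      subst hc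
      rw [List.dropWhile_cons_of_pos (by exact hs)]
      rw [ih (fun x hx => hk x (List.mem_cons_of_mem _ hx))]
      simp [pvSlugE]
    · rw [List.dropWhile_cons_of_neg (by simpa using hs)]

lemma pv_slugE_rstrip (f : List Char) (hk : ∀ c ∈ f, pvKeep c = true) :
    pvSlugE ((f.reverse.dropWhile PySem.Chars.isspace).reverse) = pvSlugE f := by
  induction f using List.reverseRecOn with
  | nil => rfl
  | append_singleton g x ih =>
    by_cases hs : PySem.Chars.isspace x = true
    · have hx : x = ' ' := pv_keep_space x (hk x (by simp)) hs
      subst hx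
      rw [List.reverse_append, List.reverse_singleton, List.singleton_append,
        List.dropWhile_cons_of_pos (by exact hs)]
      rw [ih (fun c hc => hk c (by simp [hc]))]
      exact (pv_slug_append_space g).1.symm
    · rw [List.reverse_append, List.reverse_singleton, List.singleton_append,
        List.dropWhile_cons_of_neg (by simpa using hs)]
      simp

lemma pv_slug_filter (l : List Char) :
    pvSlugE (l.filter pvKeep) = pvSlugE l ∧ ∀ p, pvSlugN p (l.filter pvKeep) = pvSlugN p l := by
  induction l with
  | nil => exact ⟨rfl, fun p => rfl⟩
  | cons c t ih =>
    by_cases hc : pvKeep c = true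
    · rw [List.filter_cons_of_pos hc]
      constructor
      · simp only [pvSlugE]
        split_ifs <;> simp [ih.1, ih.2 true, ih.2 false]
      · intro p
        simp only [pvSlugN]
        split_ifs <;> simp [ih.2 true, ih.2 false, ih.2 p]
    · have hns : ¬ (c = ' ' ∨ c = '-') := by
        intro h
        apply hc
        simp only [pvKeep, Bool.or_eq_true, decide_eq_true_eq]
        tauto
      have hna : ¬ PySem.Chars.isalnum c = true := by
        intro h
        apply hc
        simp only [pvKeep, Bool.or_eq_true, decide_eq_true_eq]
        tauto
      rw [List.filter_cons_of_neg (by simpa using hc)]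
      constructor
      · conv_rhs => rw [pvSlugE]
        rw [if_neg hns, if_neg hna]
        exact ih.1
      · intro p
        conv_rhs => rw [pvSlugN]
        rw [if_neg hns, if_neg hna]
        exact ih.2 p

lemma pv_fold_ne (f : List Char) : ∀ (out : List Char) (p : Bool), out ≠ [] →
    (f.foldl pvStep (out, p)).1 = out ++ pvSlugN p f := by
  induction f with
  | nil => intro out p _; simp [pvSlugN]
  | cons c t ih =>
    intro out p hne
    by_cases hs : c = ' ' ∨ c = '-'
    · rw [List.foldl_cons, show pvStep (out, p) c = (out, true) by
        simp [pvStep, hs, List.isEmpty_iff, hne]]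
      rw [ih out true hne]
      simp [pvSlugN, hs]
    · by_cases ha : PySem.Chars.isalnum c = true
      · rw [List.foldl_cons, show pvStep (out, p) c
            = ((if p then out ++ ['-'] else out) ++ [PySem.Chars.lowerChar c], false) by
          simp [pvStep, hs, ha]]
        rw [ih _ false (by cases p <;> simp)]
        conv_rhs => rw [pvSlugN]
        rw [if_neg hs, if_pos ha]
        cases p <;> simp
      · rw [List.foldl_cons, show pvStep (out, p) c = (out, p) by simp [pvStep, hs, ha]]
        rw [ih out p hne]
        conv_rhs => rw [pvSlugN]
        rw [if_neg hs, if_neg ha]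

lemma pv_fold_nil (f : List Char) : (f.foldl pvStep ([], false)).1 = pvSlugE f := by
  induction f with
  | nil => rfl
  | cons c t ih =>
    by_cases hs : c = ' ' ∨ c = '-'
    · rw [List.foldl_cons, show pvStep ([], false) c = ([], false) by simp [pvStep, hs]]
      rw [ih]
      simp [pvSlugE, hs]
    · by_cases ha : PySem.Chars.isalnum c = true
      · rw [List.foldl_cons, show pvStep ([], false) c = ([PySem.Chars.lowerChar c], false) by
          simp [pvStep, hs, ha]]
        rw [pv_fold_ne t [PySem.Chars.lowerChar c] false (by simp)]
        conv_rhs => rw [pvSlugE]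
        rw [if_neg hs, if_pos ha]
        simp
      · rw [List.foldl_cons, show pvStep ([], false) c = ([], false) by simp [pvStep, hs, ha]]
        rw [ih]
        conv_rhs => rw [pvSlugE]
        rw [if_neg hs, if_neg ha]

theorem pv_main (name : String) : team_logo_slug_py name = team_logo_slug_py_alt name := by
  unfold team_logo_slug_py team_logo_slug_py_alt
  by_cases h : name.toList.isEmpty
  · rw [if_pos h, if_pos h]
  · rw [if_neg h, if_neg h]
    congr 1
    dsimp only
    have hpred : (fun c => PySem.Chars.isalnum c || PySem.Chars.isIn [c] [' ', '-']) = pvKeep := by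
      funext c
      rw [pv_isIn_single]
      rfl
    rw [hpred]
    set l := name.toList with hl
    set f2 := l.filter pvKeep with hf2
    have hk2 : ∀ c ∈ f2, pvKeep c = true := fun c hc => List.of_mem_filter hc
    set g := PySem.Chars.strip f2 with hg
    have hkg : ∀ c ∈ g, pvKeep c = true := by
      intro c hc
      apply hk2
      rw [hg, PySem.Chars.strip, PySem.Chars.rstrip, PySem.Chars.lstrip] at hc
      rw [List.mem_reverse] at hc
      have hc2 := (List.dropWhile_sublist _).subset hc
      rw [List.mem_reverse] at hc2
      exact (List.dropWhile_sublist _).subset hc2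
    have e1 : PySem.Chars.lower (PySem.Chars.replace g [' '] ['-']) = g.map pvConv := by
      rw [pv_replace_sp]
      simp only [PySem.Chars.lower, List.map_map]
      rfl
    rw [e1, pv_stripChars_dash, pv_collapse_eq_ded, pv_E, (pv_dslug_map g hkg).2]
    have hklf : ∀ c ∈ f2.dropWhile PySem.Chars.isspace, pvKeep c = true :=
      fun c hc => hk2 c ((List.dropWhile_sublist _).subset hc)
    have e2 : pvSlugE g = pvSlugE f2 := by
      rw [hg, PySem.Chars.strip, PySem.Chars.rstrip, PySem.Chars.lstrip]
      rw [pv_slugE_rstrip _ hklf, pv_slugE_lstrip _ hk2]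
    rw [e2, (pv_slug_filter l).1, pv_fold_nil]

-- ===== VERDICT (by name: the statement is the Claim_ definition above) =====
theorem team_logo_slug_py_spec : Claim_equal_team_logo_slug_py := by
  intro name _
  unfold Spec_team_logo_slug_py
  exact pv_main name
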